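-- pv_equiv track=rewrite | github.com/seongikjin227-jpg/Supervisor-main-migrationagent | agents/sql_pipeline/services/llm_service.py | _has_unquoted_semicolon
-- ===== SOURCE A (Python) =====
-- def _has_unquoted_semicolon(sql_text: str) -> bool:
--     in_single_quote = False
--     idx = 0
--     while idx < len(sql_text):
--         ch = sql_text[idx]
--         if in_single_quote:
--             if ch == "'":
--                 if idx + 1 < len(sql_text) and sql_text[idx + 1] == "'":
--                     idx += 2
--                     continue
--                 in_single_quote = False
--             idx += 1
--             continue
--         if ch == "'":
--             in_single_quote = True
--             idx += 1
--             continue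
--         if ch == ";":
--             return True
--         idx += 1
--     return False
-- ===== SOURCE B (Python) =====
-- def _has_unquoted_semicolon(sql_text: str) -> bool:
--     parts = sql_text.split("'")
--     return any(";" in part for part in parts[::2])
-- ===== Notes on version B (the rewrite author's own statement) =====
-- stated objective: simpler
-- what changed: Replaces the stateful char-by-char scan with escape lookahead by a partition-then-search: split the text on single quotes and run a substring search for a semicolon only over the even-indexed (unquoted) segments; escaped quote pairs yield empty segments, so the plain parity rule computes the identical boolean.
import Mathlib
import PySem

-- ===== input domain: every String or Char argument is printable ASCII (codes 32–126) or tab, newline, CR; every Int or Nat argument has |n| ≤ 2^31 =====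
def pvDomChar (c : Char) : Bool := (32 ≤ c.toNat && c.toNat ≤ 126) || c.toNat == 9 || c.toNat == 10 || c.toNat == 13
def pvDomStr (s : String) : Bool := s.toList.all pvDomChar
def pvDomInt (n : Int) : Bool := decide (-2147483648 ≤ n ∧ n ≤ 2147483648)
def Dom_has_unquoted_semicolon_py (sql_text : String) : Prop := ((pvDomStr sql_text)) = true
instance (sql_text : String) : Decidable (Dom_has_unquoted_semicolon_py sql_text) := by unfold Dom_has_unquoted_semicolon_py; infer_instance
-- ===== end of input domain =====

-- B replaces A's stateful char-by-char scan (with '' escape lookahead) by split-on-quote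
-- and a ';' search in the even-indexed (unquoted) segments; same boolean, simpler decomposition.

-- ===== PORT A =====
-- A's while loop: index advance = consuming the char list; in_single_quote is the carried state
def loopA_has_unquoted : List Char → Bool → Bool
  | [], _ => false
  | c :: rest, true =>
      if c = '\'' then
        match rest with
        | '\'' :: rest2 => loopA_has_unquoted rest2 true   -- escaped '' : idx += 2, stay in quote
        | [] => loopA_has_unquoted [] false                -- closing quote at end of text
        | d :: rest' => loopA_has_unquoted (d :: rest') false   -- closing quote
      else loopA_has_unquoted rest true
  | c :: rest, false =>
      if c = '\'' then loopA_has_unquoted rest true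
      else if c = ';' then true
      else loopA_has_unquoted rest false
termination_by l _ => l.length
decreasing_by all_goals simp

def has_unquoted_semicolon_py (sql_text : String) : Bool :=
  loopA_has_unquoted sql_text.toList false

-- ===== PORT B =====
def has_unquoted_semicolon_py_alt (sql_text : String) : Bool :=
  let parts := (PySem.Str.split? sql_text "'").getD []        -- sql_text.split("'"); "'" ≠ "" so never none
  ((PySem.List.slice? parts none none 2).getD []).any         -- parts[::2]; step 2 ≠ 0 so never none
    (fun part => PySem.Str.isIn ";" part)                     -- any(";" in part …)

-- ===== PRECONDITION & SPEC =====
def Spec_has_unquoted_semicolon_py (sql_text : String) (out : Bool) : Prop := out = has_unquoted_semicolon_py_alt sql_text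
instance (sql_text : String) (out : Bool) : Decidable (Spec_has_unquoted_semicolon_py sql_text out) := by unfold Spec_has_unquoted_semicolon_py; infer_instance

-- ===== CLAIM (what is proved, stated in full; the proofs are below) =====
def Claim_equal_has_unquoted_semicolon_py : Prop := ∀ (sql_text : String), Dom_has_unquoted_semicolon_py sql_text → Spec_has_unquoted_semicolon_py sql_text (has_unquoted_semicolon_py sql_text)

-- ===== LEMMAS AND PROOFS =====

-- the split of a char list on '\'' : (first segment, remaining segments)
def mySplit : List Char → List Char × List (List Char)
  | [] => ([], [])
  | c :: cs =>
      if c = '\'' then ([], (mySplit cs).1 :: (mySplit cs).2)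
      else (c :: (mySplit cs).1, (mySplit cs).2)

-- does the segment contain a semicolon (B's per-part test, on the char-list side)
def hasSemi (s : List Char) : Bool := PySem.Chars.isIn [';'] s

-- alternating any: test the head iff the flag is set, flipping at each step
def anyAlt {α : Type} (p : α → Bool) : Bool → List α → Bool
  | _, [] => false
  | b, s :: t => (b && p s) || anyAlt p (!b) t

-- the even-indexed elements of a list (what parts[::2] selects)
def evens {α : Type} : List α → List α
  | [] => []
  | [x] => [x]
  | x :: _ :: r => x :: evens r

-- splitOn's recursion, accumulator-free
def segsC : List Char → List Char → List (List Char)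
  | [], cur => [cur.reverse]
  | c :: rest, cur => if c = '\'' then cur.reverse :: segsC rest [] else segsC rest (c :: cur)

lemma hasSemi_nil : hasSemi [] = false := by decide

lemma hasSemi_cons (c : Char) (h : List Char) :
    hasSemi (c :: h) = ((c == ';') || hasSemi h) := by
  have h1 : hasSemi (c :: h) = true ↔ (';' : Char) ∈ c :: h := by
    rw [hasSemi, PySem.Chars.isIn_iff_infix]; exact List.singleton_infix_iff _ _
  have h2 : hasSemi h = true ↔ (';' : Char) ∈ h := by
    rw [hasSemi, PySem.Chars.isIn_iff_infix]; exact List.singleton_infix_iff _ _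
  rw [Bool.eq_iff_iff, h1]
  simp only [List.mem_cons, Bool.or_eq_true, beq_iff_eq, ← h2]
  exact or_congr_left eq_comm

lemma goA (fuel : Nat) : ∀ (l cur : List Char) (acc : List (List Char)), l.length < fuel →
    PySem.Chars.splitOn.go ['\''] fuel l cur acc = acc.reverse ++ segsC l cur := by
  induction fuel with
  | zero => intro l cur acc h; omega
  | succ fuel ih =>
    intro l cur acc h
    cases l with
    | nil => simp [PySem.Chars.splitOn.go, segsC]
    | cons c rest =>
      by_cases hc : c = '\''
      · subst hc
        rw [show PySem.Chars.splitOn.go ['\''] (fuel+1) ('\''::rest) cur acc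
              = PySem.Chars.splitOn.go ['\''] fuel rest [] (cur.reverse :: acc) from by
          simp [PySem.Chars.splitOn.go, List.isPrefixOf]]
        rw [ih rest [] (cur.reverse :: acc) (by simp at h; omega)]
        simp [segsC]
      · rw [show PySem.Chars.splitOn.go ['\''] (fuel+1) (c::rest) cur acc
              = PySem.Chars.splitOn.go ['\''] fuel rest (c :: cur) acc from by
          simp [PySem.Chars.splitOn.go, List.isPrefixOf, Ne.symm hc]]
        rw [ih rest (c :: cur) acc (by simp at h; omega)]
        simp [segsC, hc]

lemma splitOn_quote (l : List Char) : PySem.Chars.splitOn l ['\''] = segsC l [] := by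
  rw [PySem.Chars.splitOn]; rw [goA (l.length + 1) l [] [] (by omega)]; simp

lemma segsC_eq (l : List Char) : ∀ cur, segsC l cur = (cur.reverse ++ (mySplit l).1) :: (mySplit l).2 := by
  induction l with
  | nil => intro cur; simp [segsC, mySplit]
  | cons c rest ih =>
    intro cur
    by_cases hc : c = '\''
    · simp [segsC, mySplit, hc, ih []]
    · simp [segsC, mySplit, hc, ih (c :: cur)]

lemma loopA_eq (l : List Char) (inq : Bool) :
    loopA_has_unquoted l inq = anyAlt hasSemi (!inq) ((mySplit l).1 :: (mySplit l).2) := by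
  induction l, inq using loopA_has_unquoted.induct
  case case1 => simp [loopA_has_unquoted, mySplit, anyAlt, hasSemi_nil]
  case case2 rest2 ih => simp [loopA_has_unquoted, mySplit, anyAlt, hasSemi_nil, ih]
  case case3 ih => simp [loopA_has_unquoted, mySplit, anyAlt, hasSemi_nil]
  case case4 d rest' hd ih => simp [loopA_has_unquoted, mySplit, anyAlt, hasSemi_nil, ih]
  case case5 c rest hc ih =>
    rw [show loopA_has_unquoted (c :: rest) true = loopA_has_unquoted rest true from by
      rw [loopA_has_unquoted.eq_def]; simp [hc]]
    simp [mySplit, anyAlt, hc, ih]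
  case case6 rest ih => simp [loopA_has_unquoted, mySplit, anyAlt, hasSemi_nil, ih]
  case case7 rest h => simp [loopA_has_unquoted, mySplit, anyAlt, h, hasSemi_cons]
  case case8 c rest hc hs ih =>
    have hb : (c == ';') = false := by simp [hs]
    simp [loopA_has_unquoted, mySplit, anyAlt, hc, hs, ih, hasSemi_cons, hb]

lemma filterMap_evens {α : Type} (l : List α) :
    (List.range ((l.length + 1) / 2)).filterMap (fun k => l[2 * k]?) = evens l := by
  induction l using evens.induct with
  | case1 => simp [evens]
  | case2 x => simp [evens, List.range_succ]
  | case3 x y r ih =>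
    have hlen : ((x :: y :: r).length + 1) / 2 = (r.length + 1) / 2 + 1 := by
      simp [List.length_cons]; omega
    rw [hlen, List.range_succ_eq_map, List.filterMap_cons, List.filterMap_map]
    simp only [evens]
    rw [← ih]
    simp [Nat.mul_add]

lemma slice?_two {α : Type} (l : List α) :
    PySem.List.slice? l none none 2 = some (evens l) := by
  rw [← filterMap_evens, PySem.List.slice?, PySem.List.sliceIndices]
  norm_num
  rcases Nat.eq_zero_or_pos l.length with h | h
  · simp [h]
  · rw [if_pos h]
    rw [show ((l.length : Int) + 2 - 1) = ((l.length + 1 : Nat) : Int) by push_cast; ring]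
    rw [show (2:Int) = ((2:Nat):Int) from rfl, ← Int.natCast_div, Int.toNat_natCast]
    apply List.filterMap_congr
    intro k _
    rw [← Int.natCast_mul, Int.toNat_natCast]

lemma evens_map {α β : Type} (f : α → β) (l : List α) : evens (l.map f) = (evens l).map f := by
  induction l using evens.induct <;> simp [evens, *]

lemma any_evens {α : Type} (p : α → Bool) (l : List α) : (evens l).any p = anyAlt p true l := by
  induction l using evens.induct <;> simp [evens, anyAlt, *]

-- ===== VERDICT (by name: the statement is the Claim_ definition above) =====
theorem has_unquoted_semicolon_py_spec : Claim_equal_has_unquoted_semicolon_py := by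
  intro s _
  unfold Spec_has_unquoted_semicolon_py has_unquoted_semicolon_py has_unquoted_semicolon_py_alt
  have hmap := PySem.Str.split?_map s "'"
  rw [show ("'" : String).toList = ['\''] from rfl] at hmap
  rw [show PySem.Chars.split? s.toList ['\''] = some (PySem.Chars.splitOn s.toList ['\'']) from by
    rw [PySem.Chars.split?]; rfl] at hmap
  cases hps : PySem.Str.split? s "'" with
  | none => rw [hps] at hmap; simp at hmap
  | some ps =>
    rw [hps] at hmap
    simp only [Option.map_some, Option.some.injEq] at hmap
    simp only [Option.getD_some, slice?_two]
    have h1 : ((evens ps).any fun part => PySem.Str.isIn ";" part)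
        = ((evens ps).map String.toList).any hasSemi := by
      rw [List.any_map]
      simp [Function.comp_def, hasSemi]
    rw [h1, ← evens_map, hmap, splitOn_quote, segsC_eq, loopA_eq]
    rw [any_evens]
    simp
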